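-- pv_equiv track=rewrite | github.com/randrewh/DuplicateSpans | Test.py | get_leaf_spans
-- ===== SOURCE A (Python) =====
-- def get_leaf_spans(span_id, hierarchy, span_dict, leaf_spans=None):
--     if leaf_spans is None:
--         leaf_spans = []
--     children = hierarchy.get(span_id, [])
--     if not children:
--         leaf_spans.append(span_dict[span_id])
--     else:
--         for child in children:
--             get_leaf_spans(child["spanID"], hierarchy, span_dict, leaf_spans)
--     return leaf_spans
-- ===== SOURCE B (Python) =====
-- def get_leaf_spans(span_id, hierarchy, span_dict, leaf_spans=None):
--     if leaf_spans is None: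
--         leaf_spans = []
--     stack = [span_id]
--     while stack:
--         node = stack.pop()
--         children = hierarchy.get(node, [])
--         if not children:
--             leaf_spans.append(span_dict[node])
--         else:
--             for child in reversed(children):
--                 stack.append(child["spanID"])
--     return leaf_spans
-- ===== Notes on version B (the rewrite author's own statement) =====
-- stated objective: alternative
-- what changed: The recursive DFS is replaced by an iterative DFS with an explicit stack of span ids (children pushed in reversed order to keep the left-to-right leaf order), mutating the same leaf_spans list.
import Mathlib
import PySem

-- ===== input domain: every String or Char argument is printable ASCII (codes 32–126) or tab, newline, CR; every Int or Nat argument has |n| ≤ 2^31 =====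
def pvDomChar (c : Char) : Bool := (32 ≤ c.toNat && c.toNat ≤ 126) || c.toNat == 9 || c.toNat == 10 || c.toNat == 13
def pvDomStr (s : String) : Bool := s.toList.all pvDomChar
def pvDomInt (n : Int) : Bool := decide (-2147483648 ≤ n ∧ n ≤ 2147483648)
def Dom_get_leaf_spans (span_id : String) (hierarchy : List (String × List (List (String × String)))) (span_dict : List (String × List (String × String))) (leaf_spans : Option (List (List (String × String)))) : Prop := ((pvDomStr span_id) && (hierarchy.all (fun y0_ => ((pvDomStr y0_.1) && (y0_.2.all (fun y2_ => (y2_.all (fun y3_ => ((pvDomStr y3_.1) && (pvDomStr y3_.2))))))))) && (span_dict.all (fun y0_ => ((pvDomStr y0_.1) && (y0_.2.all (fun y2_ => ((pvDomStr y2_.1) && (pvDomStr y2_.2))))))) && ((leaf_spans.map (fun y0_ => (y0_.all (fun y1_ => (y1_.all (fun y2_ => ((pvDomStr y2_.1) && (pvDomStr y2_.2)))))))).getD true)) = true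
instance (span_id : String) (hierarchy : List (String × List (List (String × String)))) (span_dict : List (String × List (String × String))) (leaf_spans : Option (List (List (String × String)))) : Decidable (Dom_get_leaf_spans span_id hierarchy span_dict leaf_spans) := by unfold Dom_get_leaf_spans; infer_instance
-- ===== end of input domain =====

-- B replaces A's recursive DFS by an iterative DFS over an explicit stack of span ids (alternative decomposition,
-- same cost); both A and B append to a caller-supplied leaf_spans list in place — the theorems are about the
-- RETURN value only (B performs the same mutation).

-- ===== PORT A =====
-- A's recursion is ported with a fuel guard (hierarchy.length + 1); under Pre_ the recursion depth never reaches it.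
mutual
def pvA_rec (hierarchy : List (String × List (List (String × String)))) (span_dict : List (String × List (String × String))) (fuel : Nat) (node : String) (acc : List (List (String × String))) : Option (List (List (String × String))) :=
  match fuel with
  | 0 => none
  | Nat.succ f =>
    let children := (PySem.Dict.mk hierarchy).getD node []
    if children = [] then
      match (PySem.Dict.mk span_dict).get? node with
      | none => none           -- KeyError: span_dict[span_id]
      | some v => some (acc ++ [v])
    else
      pvA_fold hierarchy span_dict f children acc
termination_by (fuel, 0)

def pvA_fold (hierarchy : List (String × List (List (String × String)))) (span_dict : List (String × List (String × String))) (fuel : Nat) (cs : List (List (String × String))) (acc : List (List (String × String))) : Option (List (List (String × String))) :=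
  match cs with
  | [] => some acc
  | c :: rest =>
    match (PySem.Dict.mk c).get? "spanID" with
    | none => none             -- KeyError: child["spanID"]
    | some cid =>
      match pvA_rec hierarchy span_dict fuel cid acc with
      | none => none
      | some acc2 => pvA_fold hierarchy span_dict fuel rest acc2
termination_by (fuel, cs.length + 1)
end

def get_leaf_spans (span_id : String) (hierarchy : List (String × List (List (String × String)))) (span_dict : List (String × List (String × String))) (leaf_spans : Option (List (List (String × String)))) : List (List (String × String)) :=
  (pvA_rec hierarchy span_dict (hierarchy.length + 1) span_id (leaf_spans.getD [])).getD []

-- ===== PORT B =====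
def pvB_push (cs : List (List (String × String))) (stack : List String) : Option (List String) :=
  match cs with
  | [] => some stack
  | c :: rest =>
    match (PySem.Dict.mk c).get? "spanID" with
    | none => none             -- KeyError: child["spanID"]
    | some cid => pvB_push rest (cid :: stack)

-- B's while loop is ported with a fuel guard; under Pre_ it never runs out.
def pvB_loop (hierarchy : List (String × List (List (String × String)))) (span_dict : List (String × List (String × String))) (fuel : Nat) (stack : List String) (acc : List (List (String × String))) : Option (List (List (String × String))) :=
  match stack with
  | [] => some acc
  | node :: rest =>
    match fuel with
    | 0 => none
    | Nat.succ f =>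
      let children := (PySem.Dict.mk hierarchy).getD node []
      if children = [] then
        match (PySem.Dict.mk span_dict).get? node with
        | none => none
        | some v => pvB_loop hierarchy span_dict f rest (acc ++ [v])
      else
        match pvB_push children.reverse rest with
        | none => none
        | some stack2 => pvB_loop hierarchy span_dict f stack2 acc

def pvMaxKids : List (String × List (List (String × String))) → Nat
  | [] => 0
  | p :: rest => Nat.max p.2.length (pvMaxKids rest)

def get_leaf_spans_alt (span_id : String) (hierarchy : List (String × List (List (String × String)))) (span_dict : List (String × List (String × String))) (leaf_spans : Option (List (List (String × String)))) : List (List (String × String)) :=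
  (pvB_loop hierarchy span_dict ((pvMaxKids hierarchy + 1) ^ (hierarchy.length + 1)) [span_id] (leaf_spans.getD [])).getD []

-- ===== PRECONDITION & SPEC =====
def pvIdOf (c : List (String × String)) : String := ((PySem.Dict.mk c).get? "spanID").getD ""

-- ids of the children of a node in the hierarchy
def pvChildIds (hierarchy : List (String × List (List (String × String)))) (node : String) : List String :=
  ((PySem.Dict.mk hierarchy).getD node []).map pvIdOf

-- nodes reachable from s in at most k steps (deduplicated level set)
def pvReachL (hierarchy : List (String × List (List (String × String)))) (s : String) : Nat → List String
  | 0 => [s]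
  | k + 1 => ((pvReachL hierarchy s k) ++ (pvReachL hierarchy s k).flatMap (pvChildIds hierarchy)).dedup

-- nodes reachable from y in 1 to j+1 steps (strict descendants within a bounded horizon)
def pvSR (hierarchy : List (String × List (List (String × String)))) (y : String) (j : Nat) : List String :=
  (pvChildIds hierarchy y).flatMap (fun c => pvReachL hierarchy c j)

def pvNodeOk (hierarchy : List (String × List (List (String × String)))) (span_dict : List (String × List (String × String))) (node : String) : Bool :=
  (if ((PySem.Dict.mk hierarchy).getD node []).isEmpty then ((PySem.Dict.mk span_dict).get? node).isSome
   else ((PySem.Dict.mk hierarchy).getD node []).all (fun c => ((PySem.Dict.mk c).get? "spanID").isSome)) &&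
  !((pvSR hierarchy node hierarchy.length).contains node)

-- Pre_ excludes exactly the inputs on which the Python A raises: a KeyError (span_dict[span_id] at a reachable
-- leaf, or child["spanID"] at a reachable non-leaf) or unbounded recursion (RecursionError) on a cycle reachable
-- from span_id; the bounded horizons (hierarchy.length steps) lose nothing, since any shortest path or cycle
-- visits each distinct hierarchy key at most once.
def Pre_get_leaf_spans (span_id : String) (hierarchy : List (String × List (List (String × String)))) (span_dict : List (String × List (String × String))) (leaf_spans : Option (List (List (String × String)))) : Prop :=
  ((pvReachL hierarchy span_id (hierarchy.length + 1)).all (pvNodeOk hierarchy span_dict)) = true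

instance (span_id : String) (hierarchy : List (String × List (List (String × String)))) (span_dict : List (String × List (String × String))) (leaf_spans : Option (List (List (String × String)))) : Decidable (Pre_get_leaf_spans span_id hierarchy span_dict leaf_spans) := by unfold Pre_get_leaf_spans; infer_instance

def pvWitness_get_leaf_spans : String × (List (String × List (List (String × String)))) × (List (String × List (String × String))) × (Option (List (List (String × String)))) :=
  ("a", [("a", [[("spanID", "b")]])], [("b", [("x", "y")])], none)

def Spec_get_leaf_spans (span_id : String) (hierarchy : List (String × List (List (String × String)))) (span_dict : List (String × List (String × String))) (leaf_spans : Option (List (List (String × String)))) (out : List (List (String × String))) : Prop := out = get_leaf_spans_alt span_id hierarchy span_dict leaf_spans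
instance (span_id : String) (hierarchy : List (String × List (List (String × String)))) (span_dict : List (String × List (String × String))) (leaf_spans : Option (List (List (String × String)))) (out : List (List (String × String))) : Decidable (Spec_get_leaf_spans span_id hierarchy span_dict leaf_spans out) := by unfold Spec_get_leaf_spans; infer_instance

-- ===== CLAIM (what is proved, stated in full; the proofs are below) =====
def Claim_equal_get_leaf_spans : Prop := ∀ (span_id : String) (hierarchy : List (String × List (List (String × String)))) (span_dict : List (String × List (String × String))) (leaf_spans : Option (List (List (String × String)))), Dom_get_leaf_spans span_id hierarchy span_dict leaf_spans → Pre_get_leaf_spans span_id hierarchy span_dict leaf_spans → Spec_get_leaf_spans span_id hierarchy span_dict leaf_spans (get_leaf_spans span_id hierarchy span_dict leaf_spans)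

-- ===== LEMMAS AND PROOFS =====

theorem pv_getD_len_le (l : List (String × List (List (String × String)))) (node : String) :
    ((PySem.Dict.mk l).getD node []).length ≤ pvMaxKids l := by
  induction l with
  | nil => simp [PySem.Dict.getD, PySem.Dict.get?, pvMaxKids]
  | cons p rest ih =>
    rw [PySem.Dict.getD_eq_get?_getD, PySem.Dict.get?_mk_cons]
    by_cases h : p.1 == node
    · simp [h, pvMaxKids]
    · simp only [h, Bool.false_eq_true, ite_false, pvMaxKids]
      rw [← PySem.Dict.getD_eq_get?_getD]
      exact le_trans ih (Nat.le_max_right _ _)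

theorem pv_push_ok (cs : List (List (String × String))) :
    ∀ stack, (∀ c ∈ cs, (((PySem.Dict.mk c).get? "spanID").isSome) = true) →
      pvB_push cs stack = some ((cs.map pvIdOf).reverse ++ stack) := by
  induction cs with
  | nil => intro stack _; simp [pvB_push]
  | cons c rest ih =>
    intro stack h
    have hc := h c (by simp)
    obtain ⟨cid, hcid⟩ := Option.isSome_iff_exists.mp hc
    have : pvIdOf c = cid := by simp [pvIdOf, hcid]
    simp only [pvB_push, hcid]
    rw [ih (cid :: stack) (fun x hx => h x (by simp [hx]))]
    simp [this]

theorem pv_loop_mono (hierarchy : List (String × List (List (String × String)))) (span_dict : List (String × List (String × String))) :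
    ∀ f g stack acc out, pvB_loop hierarchy span_dict f stack acc = some out → f ≤ g →
      pvB_loop hierarchy span_dict g stack acc = some out := by
  intro f
  induction f with
  | zero =>
    intro g stack acc out h _
    match stack with
    | [] => simpa [pvB_loop] using h
    | node :: rest => simp [pvB_loop] at h
  | succ f ih =>
    intro g stack acc out h hle
    match stack with
    | [] => simpa [pvB_loop] using h
    | node :: rest =>
      obtain ⟨g', rfl⟩ : ∃ g', g = g' + 1 := ⟨g - 1, by omega⟩
      simp only [pvB_loop] at h ⊢
      by_cases hemp : ((PySem.Dict.mk hierarchy).getD node []) = []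
      · rw [if_pos hemp] at h ⊢
        cases hv : (PySem.Dict.mk span_dict).get? node with
        | none => simp [hv] at h
        | some v =>
          simp only [hv] at h
          exact ih g' rest (acc ++ [v]) out h (by omega)
      · rw [if_neg hemp] at h ⊢
        cases hst : pvB_push ((PySem.Dict.mk hierarchy).getD node []).reverse rest with
        | none => simp [hst] at h
        | some st =>
          simp only [hst] at h
          exact ih g' st acc out h (by omega)

theorem pv_fold_spanID (hierarchy : List (String × List (List (String × String)))) (span_dict : List (String × List (String × String))) (f : Nat) :
    ∀ cs acc r, pvA_fold hierarchy span_dict f cs acc = some r →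
      ∀ c ∈ cs, (((PySem.Dict.mk c).get? "spanID").isSome) = true := by
  intro cs
  induction cs with
  | nil => intro acc r _ c hc; cases hc
  | cons c rest ih =>
    intro acc r h x hx
    rw [pvA_fold] at h
    cases hcid : (PySem.Dict.mk c).get? "spanID" with
    | none => simp [hcid] at h
    | some cid =>
      simp only [hcid] at h
      cases hrec : pvA_rec hierarchy span_dict f cid acc with
      | none => simp [hrec] at h
      | some acc2 =>
        simp only [hrec] at h
        rcases List.mem_cons.mp hx with rfl | hx
        · simp [hcid]
        · exact ih acc2 r h x hx

theorem pv_L2 (hierarchy : List (String × List (List (String × String)))) (span_dict : List (String × List (String × String))) :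
    ∀ f node acc r g stack out,
      pvA_rec hierarchy span_dict f node acc = some r →
      pvB_loop hierarchy span_dict g stack r = some out →
      pvB_loop hierarchy span_dict ((pvMaxKids hierarchy + 1) ^ f + g) (node :: stack) acc = some out := by
  intro f
  induction f with
  | zero => intro node acc r g stack out h _; rw [pvA_rec] at h; cases h
  | succ f ih =>
    have hfold : ∀ cs, ∀ acc r g stack out,
        pvA_fold hierarchy span_dict f cs acc = some r →
        pvB_loop hierarchy span_dict g stack r = some out →
        pvB_loop hierarchy span_dict (cs.length * (pvMaxKids hierarchy + 1) ^ f + g)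
          ((cs.map pvIdOf) ++ stack) acc = some out := by
      intro cs
      induction cs with
      | nil =>
        intro acc r g stack out h hb
        rw [pvA_fold] at h
        cases h
        simpa using hb
      | cons c rest ihc =>
        intro acc r g stack out h hb
        rw [pvA_fold] at h
        cases hcid : (PySem.Dict.mk c).get? "spanID" with
        | none => simp [hcid] at h
        | some cid =>
          simp only [hcid] at h
          cases hrec : pvA_rec hierarchy span_dict f cid acc with
          | none => simp [hrec] at h
          | some acc2 =>
            simp only [hrec] at h
            have hcont := ihc acc2 r g stack out h hb
            have hmain := ih cid acc acc2 (rest.length * (pvMaxKids hierarchy + 1) ^ f + g)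
              (rest.map pvIdOf ++ stack) out hrec hcont
            have hid : pvIdOf c = cid := by simp [pvIdOf, hcid]
            have harith : (c :: rest).length * (pvMaxKids hierarchy + 1) ^ f + g
                = (pvMaxKids hierarchy + 1) ^ f + (rest.length * (pvMaxKids hierarchy + 1) ^ f + g) := by
              rw [List.length_cons, Nat.succ_mul]; omega
            rw [harith]
            simpa [hid] using hmain
    intro node acc r g stack out h hb
    have hFpos : 0 < (pvMaxKids hierarchy + 1) ^ (f + 1) := by positivity
    obtain ⟨m, hm⟩ : ∃ m, (pvMaxKids hierarchy + 1) ^ (f + 1) + g = m + 1 :=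
      ⟨(pvMaxKids hierarchy + 1) ^ (f + 1) + g - 1, by omega⟩
    rw [hm, pvB_loop]
    rw [pvA_rec] at h
    by_cases hemp : ((PySem.Dict.mk hierarchy).getD node []) = []
    · simp only [hemp, if_pos] at h ⊢
      cases hv : (PySem.Dict.mk span_dict).get? node with
      | none => simp [hv] at h
      | some v =>
        simp only [hv] at h ⊢
        cases h
        exact pv_loop_mono hierarchy span_dict g m stack (acc ++ [v]) out hb (by omega)
    · simp only [if_neg hemp] at h ⊢
      have hsp := pv_fold_spanID hierarchy span_dict f _ _ _ h
      have hpush := pv_push_ok (((PySem.Dict.mk hierarchy).getD node []).reverse) stack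
        (fun c hc => hsp c (List.mem_reverse.mp hc))
      rw [hpush]
      have hids : ((((PySem.Dict.mk hierarchy).getD node []).reverse.map pvIdOf).reverse)
          = ((PySem.Dict.mk hierarchy).getD node []).map pvIdOf := by
        rw [List.map_reverse, List.reverse_reverse]
      rw [hids]
      have hcall := hfold ((PySem.Dict.mk hierarchy).getD node []) acc r g stack out h hb
      apply pv_loop_mono hierarchy span_dict _ m _ acc out hcall
      have hcl : ((PySem.Dict.mk hierarchy).getD node []).length ≤ pvMaxKids hierarchy :=
        pv_getD_len_le hierarchy node
      have hmul : ((PySem.Dict.mk hierarchy).getD node []).length * (pvMaxKids hierarchy + 1) ^ f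
          ≤ pvMaxKids hierarchy * (pvMaxKids hierarchy + 1) ^ f :=
        Nat.mul_le_mul_right _ hcl
      have hEpos : 0 < (pvMaxKids hierarchy + 1) ^ f := by positivity
      have hexp : (pvMaxKids hierarchy + 1) ^ (f + 1)
          = pvMaxKids hierarchy * (pvMaxKids hierarchy + 1) ^ f + (pvMaxKids hierarchy + 1) ^ f := by
        rw [pow_succ, Nat.mul_comm, Nat.succ_mul]
      omega

-- reachability toolbox
theorem pv_reach_mono (hierarchy : List (String × List (List (String × String)))) (s : String) :
    ∀ k l, k ≤ l → ∀ x, x ∈ pvReachL hierarchy s k → x ∈ pvReachL hierarchy s l := by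

  intro k l hle
  induction l with
  | zero =>
    intro x hx
    have : k = 0 := by omega
    rwa [this] at hx
  | succ l ihl =>
    intro x hx
    by_cases h : k = l + 1
    · rwa [h] at hx
    · have := ihl (by omega) x hx
      simp only [pvReachL, List.mem_dedup]
      exact List.mem_append_left _ this

theorem pv_reach_step (hierarchy : List (String × List (List (String × String)))) (s : String) (k : Nat)
    (x y : String) (hx : x ∈ pvReachL hierarchy s k) (hy : y ∈ pvChildIds hierarchy x) :
    y ∈ pvReachL hierarchy s (k + 1) := by

  simp only [pvReachL, List.mem_dedup, List.mem_append, List.mem_flatMap]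
  exact Or.inr ⟨x, hx, hy⟩

theorem pv_SR_mono (hierarchy : List (String × List (List (String × String)))) (y : String)
    (j j' : Nat) (h : j ≤ j') (x : String) (hx : x ∈ pvSR hierarchy y j) : x ∈ pvSR hierarchy y j' := by

  simp only [pvSR, List.mem_flatMap] at hx ⊢
  obtain ⟨c, hc, hxc⟩ := hx
  exact ⟨c, hc, pv_reach_mono hierarchy c j j' h x hxc⟩

theorem pv_key_of_ne (l : List (String × List (List (String × String)))) (node : String)
    (h : ((PySem.Dict.mk l).getD node []) ≠ []) : node ∈ l.map Prod.fst := by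

  induction l with
  | nil => simp [PySem.Dict.getD, PySem.Dict.get?] at h
  | cons p rest ih =>
    rw [PySem.Dict.getD_eq_get?_getD, PySem.Dict.get?_mk_cons] at h
    simp only [List.map_cons, List.mem_cons]
    by_cases hp : p.1 == node
    · exact Or.inl (eq_of_beq hp).symm
    · simp only [hp, Bool.false_eq_true, ite_false] at h
      rw [← PySem.Dict.getD_eq_get?_getD] at h
      exact Or.inr (ih h)

theorem pv_path_len (l : List (String × List (List (String × String)))) (path : List String)
    (hnd : path.Nodup) (hkeys : ∀ p ∈ path, ((PySem.Dict.mk l).getD p []) ≠ []) :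
    path.length ≤ l.length := by

  have h1 : path.toFinset.card = path.length := List.toFinset_card_of_nodup hnd
  have h2 : path.toFinset ⊆ (l.map Prod.fst).toFinset := by
    intro x hx
    exact List.mem_toFinset.mpr (pv_key_of_ne l x (hkeys x (List.mem_toFinset.mp hx)))
  have h3 := Finset.card_le_card h2
  have h4 : (l.map Prod.fst).toFinset.card ≤ (l.map Prod.fst).length := List.toFinset_card_le _
  rw [List.length_map] at h4
  omega

theorem pv_suff (hierarchy : List (String × List (List (String × String)))) (span_dict : List (String × List (String × String))) (span_id : String)
    (hpre : ∀ y ∈ pvReachL hierarchy span_id (hierarchy.length + 1), pvNodeOk hierarchy span_dict y = true) :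
    ∀ m (path : List String) (node : String) (acc : List (List (String × String))),
      path.Nodup →
      (∀ p ∈ path, ((PySem.Dict.mk hierarchy).getD p []) ≠ []) →
      node ∈ pvReachL hierarchy span_id path.length →
      (∀ i (h : i < path.length), node ∈ pvSR hierarchy path[i] i) →
      hierarchy.length + 1 ≤ m + path.length →
      ∃ r, pvA_rec hierarchy span_dict m node acc = some r := by

  intro m
  induction m with
  | zero =>
    intro path node acc ha hb hc hd hm
    have hlen := pv_path_len hierarchy path ha hb
    exact absurd hm (by omega)
  | succ f ih =>
    intro path node acc ha hb hc hd hm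
    have hplen : path.length ≤ hierarchy.length := pv_path_len hierarchy path ha hb
    have hnodeR : node ∈ pvReachL hierarchy span_id (hierarchy.length + 1) :=
      pv_reach_mono hierarchy span_id path.length (hierarchy.length + 1) (by omega) node hc
    have hok := hpre node hnodeR
    rw [pvNodeOk] at hok
    simp only [Bool.and_eq_true, Bool.not_eq_true'] at hok
    obtain ⟨hok1, hacyc⟩ := hok
    by_cases hemp : ((PySem.Dict.mk hierarchy).getD node []) = []
    · simp only [List.isEmpty_iff, hemp, if_pos] at hok1
      obtain ⟨v, hv⟩ := Option.isSome_iff_exists.mp hok1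
      exact ⟨acc ++ [v], by rw [pvA_rec]; simp [hemp, hv]⟩
    · rw [if_neg (by simp [List.isEmpty_iff, hemp])] at hok1
      rw [List.all_eq_true] at hok1
      have hnotmem : node ∉ path := by
        intro hmem
        obtain ⟨i, hi, hEq⟩ := List.getElem_of_mem hmem
        have h1 := hd i hi
        rw [hEq] at h1
        have h2 := pv_SR_mono hierarchy node i hierarchy.length (by omega) node h1
        have h3 := (List.contains_iff_mem).mpr h2
        rw [hacyc] at h3
        cases h3
      have hstep : ∀ c ∈ (PySem.Dict.mk hierarchy).getD node [],
          ∃ cid, (PySem.Dict.mk c).get? "spanID" = some cid ∧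
            ∀ acc2, ∃ r, pvA_rec hierarchy span_dict f cid acc2 = some r := by
        intro c hcmem
        obtain ⟨cid, hcid⟩ := Option.isSome_iff_exists.mp (hok1 c hcmem)
        have hid : pvIdOf c = cid := by simp [pvIdOf, hcid]
        have hkid : cid ∈ pvChildIds hierarchy node := by
          rw [← hid]
          exact List.mem_map_of_mem hcmem
        refine ⟨cid, hcid, fun acc2 => ?_⟩
        refine ih (node :: path) cid acc2 (List.nodup_cons.mpr ⟨hnotmem, ha⟩) ?_ ?_ ?_ ?_
        · intro p hp
          rcases List.mem_cons.mp hp with rfl | hp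
          · exact hemp
          · exact hb p hp
        · simpa using pv_reach_step hierarchy span_id path.length node cid hc hkid
        · intro i hi
          cases i with
          | zero =>
            simp only [List.getElem_cons_zero]
            simp only [pvSR, List.mem_flatMap]
            exact ⟨cid, hkid, by simp [pvReachL]⟩
          | succ i =>
            simp only [List.getElem_cons_succ]
            have hi' : i < path.length := by simpa using Nat.lt_of_succ_lt_succ (by simpa using hi)
            have h1 := hd i hi'
            simp only [pvSR, List.mem_flatMap] at h1 ⊢
            obtain ⟨c0, hc0, hn0⟩ := h1
            exact ⟨c0, hc0, pv_reach_step hierarchy c0 i node cid hn0 hkid⟩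
        · simp only [List.length_cons]
          omega
      have hfold : ∀ cs, (∀ c ∈ cs, c ∈ (PySem.Dict.mk hierarchy).getD node []) →
          ∀ acc2, ∃ r, pvA_fold hierarchy span_dict f cs acc2 = some r := by
        intro cs
        induction cs with
        | nil => intro _ acc2; exact ⟨acc2, by rw [pvA_fold]⟩
        | cons c rest ihc =>
          intro hsub acc2
          obtain ⟨cid, hcid, hrec⟩ := hstep c (hsub c (by simp))
          obtain ⟨acc3, hacc3⟩ := hrec acc2
          obtain ⟨r, hr⟩ := ihc (fun x hx => hsub x (by simp [hx])) acc3
          exact ⟨r, by rw [pvA_fold]; simp only [hcid, hacc3, hr]⟩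
      obtain ⟨r, hr⟩ := hfold ((PySem.Dict.mk hierarchy).getD node []) (fun c hc => hc) acc
      exact ⟨r, by rw [pvA_rec]; simp only [if_neg hemp]; exact hr⟩

-- ===== VERDICT (by name: the statement is the Claim_ definition above) =====
theorem get_leaf_spans_spec : Claim_equal_get_leaf_spans := by
  unfold Claim_equal_get_leaf_spans
  intro span_id hierarchy span_dict leaf_spans _ hpre
  unfold Spec_get_leaf_spans get_leaf_spans get_leaf_spans_alt
  have hpre' : ∀ y ∈ pvReachL hierarchy span_id (hierarchy.length + 1),
      pvNodeOk hierarchy span_dict y = true := by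
    rw [Pre_get_leaf_spans, List.all_eq_true] at hpre
    intro x hx; exact hpre x hx
  obtain ⟨r, hr⟩ := pv_suff hierarchy span_dict span_id hpre' (hierarchy.length + 1) [] span_id
    (leaf_spans.getD []) (by simp) (by simp) (by simp [pvReachL]) (by intro i h; simp at h) (by simp)
  have hb0 : pvB_loop hierarchy span_dict 0 [] r = some r := by rw [pvB_loop]
  have := pv_L2 hierarchy span_dict (hierarchy.length + 1) span_id (leaf_spans.getD []) r 0 [] r hr hb0
  rw [Nat.add_zero] at this
  rw [hr, this]
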